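-- pv_equiv track=rewrite | github.com/MoPro195/python_project | main/main.py | number_as_text
-- ===== SOURCE A (Python) =====
-- def number_as_text(number):
--     if not isinstance(number, int):
--         raise TypeError("Numbers must be integers")
--     digits_text = []
--     while number > 0:
--         last_digit = number % 10
--         if last_digit == 0:
--             digit_text = "ZERO"
--         elif last_digit == 1:
--             digit_text = "ONE"
--         elif last_digit == 2:
--             digit_text = "TWO"
--         elif last_digit == 3:
--             digit_text = "THREE"
--         elif last_digit == 4:
--             digit_text = "FOUR"
--         elif last_digit == 5:
--             digit_text = "FIVE"
--         elif last_digit == 6: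
--             digit_text = "SIX"
--         elif last_digit == 7:
--             digit_text = "SEVEN"
--         elif last_digit == 8:
--             digit_text = "EIGHT"
--         elif last_digit == 9:
--             digit_text = "NINE"
--         else:
--             digit_text = ""
--         digits_text.insert(0, digit_text)
--         number //= 10
--
--     return " ".join(digits_text)
-- ===== SOURCE B (Python) =====
-- def number_as_text(number):
--     if not isinstance(number, int):
--         raise TypeError("Numbers must be integers")
--     if number <= 0:
--         return ""
--     names = {"0": "ZERO", "1": "ONE", "2": "TWO", "3": "THREE", "4": "FOUR",
--              "5": "FIVE", "6": "SIX", "7": "SEVEN", "8": "EIGHT", "9": "NINE"}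
--     return " ".join(names[c] for c in format(number, "d"))
-- ===== Notes on version B (the rewrite author's own statement) =====
-- stated objective: idiomatic
-- what changed: Replaces the while-loop mod/div digit extraction with front-insertion by a dict lookup over the characters of the decimal string representation, joined in one pass.
import Mathlib
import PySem

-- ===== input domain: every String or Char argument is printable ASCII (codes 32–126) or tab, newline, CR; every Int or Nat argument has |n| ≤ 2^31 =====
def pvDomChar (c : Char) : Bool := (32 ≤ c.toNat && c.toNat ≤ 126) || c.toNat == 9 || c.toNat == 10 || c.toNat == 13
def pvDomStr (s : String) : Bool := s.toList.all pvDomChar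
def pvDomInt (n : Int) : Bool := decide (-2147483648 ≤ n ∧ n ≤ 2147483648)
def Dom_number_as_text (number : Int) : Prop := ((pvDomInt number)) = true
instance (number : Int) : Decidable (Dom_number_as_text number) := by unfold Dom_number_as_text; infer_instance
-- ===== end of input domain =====

-- B replaces A's while-loop digit extraction (mod/div with list front-insertion) by a
-- dict lookup over the characters of the decimal string, joined in one pass (idiomatic).

-- ===== PORT A =====
-- the while loop: pulls off the last digit, names it, prepends, and divides by 10
def pvALoop (number : Int) (acc : List String) : List String :=
  if _h : 0 < number then
    let last_digit := PySem.Int.mod number 10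
    let digit_text :=
      if last_digit = 0 then "ZERO"
      else if last_digit = 1 then "ONE"
      else if last_digit = 2 then "TWO"
      else if last_digit = 3 then "THREE"
      else if last_digit = 4 then "FOUR"
      else if last_digit = 5 then "FIVE"
      else if last_digit = 6 then "SIX"
      else if last_digit = 7 then "SEVEN"
      else if last_digit = 8 then "EIGHT"
      else if last_digit = 9 then "NINE"
      else ""
    pvALoop (PySem.Int.floordiv number 10) (digit_text :: acc)
  else acc
termination_by number.toNat
decreasing_by
  rw [PySem.Int.floordiv_eq_ediv_of_pos (by omega)]
  omega

def number_as_text (number : Int) : String :=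
  PySem.Str.join " " (pvALoop number [])

-- ===== PORT B =====
def pvNames : PySem.Dict String String :=
  PySem.Dict.ofList [("0", "ZERO"), ("1", "ONE"), ("2", "TWO"), ("3", "THREE"),
    ("4", "FOUR"), ("5", "FIVE"), ("6", "SIX"), ("7", "SEVEN"), ("8", "EIGHT"), ("9", "NINE")]

def number_as_text_alt (number : Int) : String :=
  if number ≤ 0 then ""
  else
    PySem.Str.join " "
      ((PySem.Int.toChars number).map (fun c => pvNames.getD (String.ofList [c]) ""))

-- ===== PRECONDITION & SPEC =====
def Spec_number_as_text (number : Int) (out : String) : Prop := out = number_as_text_alt number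
instance (number : Int) (out : String) : Decidable (Spec_number_as_text number out) := by unfold Spec_number_as_text; infer_instance

-- ===== CLAIM (what is proved, stated in full; the proofs are below) =====
def Claim_equal_number_as_text : Prop := ∀ (number : Int), Dom_number_as_text number → Spec_number_as_text number (number_as_text number)

-- ===== LEMMAS AND PROOFS =====

-- B's per-character lookup, as a function on chars
def pvG (c : Char) : String := pvNames.getD (String.ofList [c]) ""

-- A's loop is the map of B's lookup over Nat.toDigitsCore (same prepend-and-divide structure)
lemma pvALoop_toDigitsCore :
    ∀ (fuel m : Nat) (ds : List Char), 0 < m → m < fuel →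
      pvALoop (m : Int) (ds.map pvG) = (Nat.toDigitsCore 10 fuel m ds).map pvG := by
  intro fuel
  induction fuel with
  | zero => intro m ds hm hf; omega
  | succ f ih =>
    intro m ds hm hf
    rw [pvALoop]
    simp only [Nat.toDigitsCore]
    have hpos : (0 : Int) < (m : Int) := by exact_mod_cast hm
    rw [dif_pos hpos]
    have hmod : PySem.Int.mod (m : Int) 10 = ((m % 10 : Nat) : Int) := by
      exact_mod_cast PySem.Int.mod_natCast m 10
    have hdiv : PySem.Int.floordiv (m : Int) 10 = ((m / 10 : Nat) : Int) := by
      exact_mod_cast PySem.Int.floordiv_natCast m 10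
    have hname : (if PySem.Int.mod (m : Int) 10 = 0 then "ZERO"
      else if PySem.Int.mod (m : Int) 10 = 1 then "ONE"
      else if PySem.Int.mod (m : Int) 10 = 2 then "TWO"
      else if PySem.Int.mod (m : Int) 10 = 3 then "THREE"
      else if PySem.Int.mod (m : Int) 10 = 4 then "FOUR"
      else if PySem.Int.mod (m : Int) 10 = 5 then "FIVE"
      else if PySem.Int.mod (m : Int) 10 = 6 then "SIX"
      else if PySem.Int.mod (m : Int) 10 = 7 then "SEVEN"
      else if PySem.Int.mod (m : Int) 10 = 8 then "EIGHT"
      else if PySem.Int.mod (m : Int) 10 = 9 then "NINE"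
      else "") = pvG (Nat.digitChar (m % 10)) := by
      rw [hmod]
      have h10 : m % 10 < 10 := Nat.mod_lt _ (by omega)
      interval_cases h : m % 10 <;> decide
    by_cases hz : m / 10 = 0
    · rw [if_pos hz]
      rw [hname, hdiv, hz]
      rw [pvALoop]
      norm_num
    · rw [if_neg hz]
      rw [hname, hdiv]
      have : pvG (Nat.digitChar (m % 10)) :: List.map pvG ds
          = (Nat.digitChar (m % 10) :: ds).map pvG := by simp
      rw [this]
      exact ih (m / 10) _ (by omega) (by omega)

lemma pvALoop_nonpos (n : Int) (h : ¬ 0 < n) (acc : List String) : pvALoop n acc = acc := by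
  rw [pvALoop, dif_neg h]

-- ===== VERDICT (by name: the statement is the Claim_ definition above) =====
theorem number_as_text_spec : Claim_equal_number_as_text := by
  intro number _
  unfold Spec_number_as_text number_as_text number_as_text_alt
  by_cases h : number ≤ 0
  · rw [if_pos h, pvALoop_nonpos number (by omega)]
    decide
  · rw [if_neg h]
    have hm : number = ((number.toNat : Nat) : Int) := by omega
    have hpos : 0 < number.toNat := by omega
    have htc : PySem.Int.toChars number = Nat.toDigits 10 number.toNat := by
      unfold PySem.Int.toChars
      rw [if_neg (by omega)]
    rw [htc]
    unfold Nat.toDigits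
    rw [hm]
    have := pvALoop_toDigitsCore (number.toNat + 1) number.toNat [] hpos (by omega)
    simp only [List.map_nil] at this
    rw [this]
    rfl
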